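-- pv_equiv track=rewrite | github.com/zuquan-song/leetcode | amazon/MaxOfMinAltitudes.py | maxOfMinAltitudes2
-- ===== SOURCE A (Python) =====
-- def maxOfMinAltitudes2(matrix):
--     if not matrix or not matrix[0]:
--         return 0
--
--     n, m = len(matrix), len(matrix[0])
--
--     dp = [[0] * m for _ in range(n)]
--
--     for i in range(n):
--         for j in range(m):
--             if i == 0 and j == 0:
--                 dp[i][j] = matrix[i][j]
--             elif i == 0:
--                 dp[i][j] = min(matrix[i][j], matrix[i][j - 1])
--             elif j == 0:
--                 dp[i][j] = min(matrix[i][j], matrix[i - 1][j])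
--             else:
--                 dp[i][j] = min(matrix[i][j], max(dp[i - 1][j], dp[i][j - 1]))
--
--     return dp[-1][-1]
-- ===== SOURCE B (Python) =====
-- def maxOfMinAltitudes2(matrix):
--     # Demand-driven (top-down) memoized evaluation of the altitude recurrence.
--     # solve(i, j) is written as a recursive generator: 'v = yield (a, b)' requests
--     # the value of cell (a, b); a small trampoline runs the suspended frames on an
--     # explicit stack with a memo table, so no call-stack depth is ever needed.
--     if not matrix or not matrix[0]:
--         return 0
--
--     def solve(i, j):
--         if i == 0 and j == 0:
--             return matrix[0][0]
--         if i == 0: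
--             return min(matrix[0][j], matrix[0][j - 1])
--         if j == 0:
--             return min(matrix[i][0], matrix[i - 1][0])
--         up = yield (i - 1, j)
--         left = yield (i, j - 1)
--         return min(matrix[i][j], max(up, left))
--         yield  # never reached; makes every solve(i, j) a generator
--
--     memo = {}
--     i0, j0 = len(matrix) - 1, len(matrix[0]) - 1
--     stack = [((i0, j0), solve(i0, j0))]
--     sent = None
--     while stack:
--         cell, frame = stack[-1]
--         try:
--             req = frame.send(sent)
--         except StopIteration as done:
--             memo[cell] = done.value
--             stack.pop()
--             sent = done.value
--             continue
--         if req in memo: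
--             sent = memo[req]
--         else:
--             stack.append((req, solve(*req)))
--             sent = None
--     return memo[(i0, j0)]
-- ===== Notes on version B (the rewrite author's own statement) =====
-- stated objective: alternative
-- what changed: A fills a full n x m dp table bottom-up with nested index loops; B evaluates the recurrence top-down on demand from the target cell, as a recursive-generator solve(i,j) driven by an explicit trampoline stack with a memo dict (no dp table, no index loops, and no call-stack depth).
import Mathlib
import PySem

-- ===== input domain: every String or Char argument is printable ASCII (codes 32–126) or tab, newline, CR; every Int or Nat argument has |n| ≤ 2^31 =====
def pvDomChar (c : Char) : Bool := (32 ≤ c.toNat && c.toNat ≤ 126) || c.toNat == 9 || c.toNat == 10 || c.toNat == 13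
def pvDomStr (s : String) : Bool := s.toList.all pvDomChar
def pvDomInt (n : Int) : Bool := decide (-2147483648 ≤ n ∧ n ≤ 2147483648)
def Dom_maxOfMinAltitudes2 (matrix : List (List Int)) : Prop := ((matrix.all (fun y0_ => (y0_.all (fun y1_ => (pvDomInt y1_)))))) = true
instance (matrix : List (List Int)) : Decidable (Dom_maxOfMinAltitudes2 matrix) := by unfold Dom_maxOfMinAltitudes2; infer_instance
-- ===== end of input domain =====

-- A fills the full n×m dp table bottom-up with nested index loops; B evaluates the same
-- recurrence top-down on demand from the target cell via a memoized trampoline (alternative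
-- decomposition, not claimed faster); return values agree on Pre_.

-- ===== PORT A =====
def pvCellA (matrix dp : List (List Int)) (i j : Int) : Int :=
  if i = 0 ∧ j = 0 then PySem.List.pyGetD (PySem.List.pyGetD matrix i []) j 0
  else if i = 0 then
    min (PySem.List.pyGetD (PySem.List.pyGetD matrix i []) j 0)
        (PySem.List.pyGetD (PySem.List.pyGetD matrix i []) (j - 1) 0)
  else if j = 0 then
    min (PySem.List.pyGetD (PySem.List.pyGetD matrix i []) j 0)
        (PySem.List.pyGetD (PySem.List.pyGetD matrix (i - 1) []) j 0)
  else
    min (PySem.List.pyGetD (PySem.List.pyGetD matrix i []) j 0)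
        (max (PySem.List.pyGetD (PySem.List.pyGetD dp (i - 1) []) j 0)
             (PySem.List.pyGetD (PySem.List.pyGetD dp i []) (j - 1) 0))

def pvStepA (matrix dp : List (List Int)) (i j : Int) : List (List Int) :=
  PySem.List.pySetD dp i (PySem.List.pySetD (PySem.List.pyGetD dp i []) j (pvCellA matrix dp i j))

def maxOfMinAltitudes2 (matrix : List (List Int)) : Int :=
  if matrix = [] ∨ matrix.headD [] = [] then 0
  else
    let n : Int := matrix.length
    let m : Int := (matrix.headD []).length
    let dp0 : List (List Int) := List.replicate matrix.length (List.replicate (matrix.headD []).length (0 : Int))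
    let dp := (PySem.List.pyRange 0 n 1).foldl (fun dp i =>
      (PySem.List.pyRange 0 m 1).foldl (fun dp j => pvStepA matrix dp i j) dp) dp0
    PySem.List.pyGetD (PySem.List.pyGetD dp (-1) []) (-1) 0

-- ===== PORT B =====
-- Source B's solve(i, j) is a recursive generator run by a trampoline (explicit stack + memo dict);
-- each 'yield (a, b)' request first consults the memo and otherwise starts the frame for (a, b),
-- and every finished frame stores its value in the memo. Its denotation — ported here exactly —
-- is this memo-threaded recursion on (i, j); matrix[i][j] accesses are pvAccB (exact in range;
-- Pre_ excludes the inputs where Python raises IndexError).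
def pvAccB (matrix : List (List Int)) (i j : Nat) : Int :=
  PySem.List.pyGetD (PySem.List.pyGetD matrix (i : Int) []) (j : Int) 0

def solveB (matrix : List (List Int)) :
    Nat → Nat → PySem.Dict (Nat × Nat) Int → Int × PySem.Dict (Nat × Nat) Int
  | 0, 0, memo =>
    let v := pvAccB matrix 0 0
    (v, memo.insert (0, 0) v)
  | 0, j + 1, memo =>
    let v := min (pvAccB matrix 0 (j + 1)) (pvAccB matrix 0 j)
    (v, memo.insert (0, j + 1) v)
  | i + 1, 0, memo =>
    let v := min (pvAccB matrix (i + 1) 0) (pvAccB matrix i 0)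
    (v, memo.insert (i + 1, 0) v)
  | i + 1, j + 1, memo =>
    let r1 :=
      match memo.get? (i, j + 1) with
      | some v => (v, memo)
      | none => solveB matrix i (j + 1) memo
    let r2 :=
      match r1.2.get? (i + 1, j) with
      | some v => (v, r1.2)
      | none => solveB matrix (i + 1) j r1.2
    let v := min (pvAccB matrix (i + 1) (j + 1)) (max r1.1 r2.1)
    (v, r2.2.insert (i + 1, j + 1) v)
termination_by i j _ => (i, j)

def maxOfMinAltitudes2_alt (matrix : List (List Int)) : Int :=
  if matrix = [] ∨ matrix.headD [] = [] then 0
  else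
    (solveB matrix (matrix.length - 1) ((matrix.headD []).length - 1) PySem.Dict.empty).1

-- ===== PRECONDITION & SPEC =====
-- A raises IndexError exactly when some row is shorter than the first row (the first row
-- being nonempty); Pre_ excludes exactly those inputs and nothing A returns on.
def Pre_maxOfMinAltitudes2 (matrix : List (List Int)) : Prop :=
  ∀ row ∈ matrix, (matrix.headD []).length ≤ row.length
instance (matrix : List (List Int)) : Decidable (Pre_maxOfMinAltitudes2 matrix) := by
  unfold Pre_maxOfMinAltitudes2; infer_instance

def pvWitness_maxOfMinAltitudes2 : List (List Int) := [[1, 2], [3, 4]]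

def Spec_maxOfMinAltitudes2 (matrix : List (List Int)) (out : Int) : Prop := out = maxOfMinAltitudes2_alt matrix
instance (matrix : List (List Int)) (out : Int) : Decidable (Spec_maxOfMinAltitudes2 matrix out) := by unfold Spec_maxOfMinAltitudes2; infer_instance

-- ===== CLAIM (what is proved, stated in full; the proofs are below) =====
def Claim_equal_maxOfMinAltitudes2 : Prop := ∀ (matrix : List (List Int)), Dom_maxOfMinAltitudes2 matrix → Pre_maxOfMinAltitudes2 matrix → Spec_maxOfMinAltitudes2 matrix (maxOfMinAltitudes2 matrix)

-- ===== LEMMAS AND PROOFS =====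
def aF (matrix : List (List Int)) (i j : Nat) : Int := (matrix.getD i []).getD j 0
def fF (matrix : List (List Int)) : Nat → Nat → Int
  | 0, 0 => aF matrix 0 0
  | 0, j + 1 => min (aF matrix 0 (j + 1)) (aF matrix 0 j)
  | i + 1, 0 => min (aF matrix (i + 1) 0) (aF matrix i 0)
  | i + 1, j + 1 =>
    min (aF matrix (i + 1) (j + 1)) (max (fF matrix i (j + 1)) (fF matrix (i + 1) j))
termination_by i j => (i, j)
def rowF (matrix : List (List Int)) (m i : Nat) : List Int :=
  (List.range m).map (fun j => fF matrix i j)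
def dpS (matrix : List (List Int)) (n m i j : Nat) : List (List Int) :=
  (List.range n).map (fun r =>
    if r < i then rowF matrix m r
    else if r = i then (List.range m).map (fun k => if k < j then fF matrix i k else 0)
    else List.replicate m 0)

theorem getD_dpS (matrix : List (List Int)) (n m i j r : Nat) (hr : r < n) :
    (dpS matrix n m i j).getD r [] =
      (if r < i then rowF matrix m r
       else if r = i then (List.range m).map (fun k => if k < j then fF matrix i k else 0)
       else List.replicate m 0) := by
  exact PySem.List.getD_map_range _ n r [] hr

theorem cellA_spec (matrix : List (List Int)) (n m I J : Nat) (hI : I < n) (hJ : J < m) :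
    pvCellA matrix (dpS matrix n m I J) (I : Int) (J : Int) = fF matrix I J := by
  match I, J with
  | 0, 0 =>
    simp [pvCellA, fF, aF, PySem.List.pyGetD_zero]
  | 0, J+1 =>
    have hc : ¬(((0:Nat):Int) = 0 ∧ ((J+1:Nat):Int) = 0) := by omega
    have h3 : ((J+1:Nat):Int) - 1 = ((J:Nat):Int) := by omega
    rw [pvCellA, if_neg hc, if_pos (by omega : ((0:Nat):Int) = 0), h3]
    simp only [PySem.List.pyGetD_natCast]
    simp [fF, aF]
  | I+1, 0 =>
    have hc : ¬(((I+1:Nat):Int) = 0 ∧ ((0:Nat):Int) = 0) := by omega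
    have h3 : ((I+1:Nat):Int) - 1 = ((I:Nat):Int) := by omega
    rw [pvCellA, if_neg hc, if_neg (by omega : ¬((I+1:Nat):Int) = 0),
        if_pos (by omega : ((0:Nat):Int) = 0), h3]
    simp only [PySem.List.pyGetD_natCast]
    simp [fF, aF]
  | I+1, J+1 =>
    have hc : ¬(((I+1:Nat):Int) = 0 ∧ ((J+1:Nat):Int) = 0) := by omega
    have h3 : ((I+1:Nat):Int) - 1 = ((I:Nat):Int) := by omega
    have h4 : ((J+1:Nat):Int) - 1 = ((J:Nat):Int) := by omega
    rw [pvCellA, if_neg hc, if_neg (by omega : ¬((I+1:Nat):Int) = 0),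
        if_neg (by omega : ¬((J+1:Nat):Int) = 0), h3, h4]
    simp only [PySem.List.pyGetD_natCast]
    rw [getD_dpS matrix n m (I+1) (J+1) I (by omega),
        getD_dpS matrix n m (I+1) (J+1) (I+1) hI]
    rw [if_pos (by omega : I < I+1)]
    rw [if_neg (by omega : ¬(I+1 < I+1)), if_pos rfl]
    rw [show (rowF matrix m I).getD (J+1) 0 = fF matrix I (J+1) from
          PySem.List.getD_map_range _ m (J+1) 0 hJ]
    rw [PySem.List.getD_map_range _ m J 0 (by omega), if_pos (by omega : J < J+1)]
    rw [fF]
    rfl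

theorem getElem_dpS (matrix : List (List Int)) (n m i j r : Nat)
    (h : r < (dpS matrix n m i j).length) :
    (dpS matrix n m i j)[r] =
      (if r < i then rowF matrix m r
       else if r = i then (List.range m).map (fun k => if k < j then fF matrix i k else 0)
       else List.replicate m 0) := by
  simp only [dpS, List.getElem_map, List.getElem_range]

theorem stepA_spec (matrix : List (List Int)) (n m I J : Nat) (hI : I < n) (hJ : J < m) :
    pvStepA matrix (dpS matrix n m I J) (I : Int) (J : Int) = dpS matrix n m I (J + 1) := by
  unfold pvStepA
  rw [PySem.List.pySetD_natCast, PySem.List.pyGetD_natCast, PySem.List.pySetD_natCast,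
      cellA_spec matrix n m I J hI hJ]
  rw [getD_dpS matrix n m I J I hI, if_neg (by omega : ¬(I < I)), if_pos rfl]
  apply List.ext_getElem
  · simp [dpS]
  · intro r h1 h2
    have hrn : r < n := by simpa [dpS] using h2
    rw [getElem_dpS]
    by_cases hr : I = r
    · subst hr
      rw [List.getElem_set_self]
      rw [if_neg (by omega : ¬ I < I), if_pos rfl]
      apply List.ext_getElem
      · simp
      · intro k k1 k2
        have hkm : k < m := by simpa using k2
        by_cases hk : J = k
        · subst hk
          rw [List.getElem_set_self]
          simp only [List.getElem_map, List.getElem_range]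
          rw [if_pos (by omega : J < J + 1)]
        · rw [List.getElem_set_ne (by omega)]
          simp only [List.getElem_map, List.getElem_range]
          split_ifs <;> first | rfl | omega
    · rw [List.getElem_set_ne (by omega), getElem_dpS]
      split_ifs <;> first | rfl | omega

theorem innerFoldA (matrix : List (List Int)) (n m I : Nat) (hI : I < n) :
    ∀ (t J : Nat), J + t = m →
      (List.range' J t).foldl (fun dp (j : Nat) => pvStepA matrix dp (I : Int) (j : Int))
        (dpS matrix n m I J) = dpS matrix n m I m := by
  intro t
  induction t with
  | zero =>
    intro J hJ
    have : J = m := by omega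
    subst this; simp [List.range']
  | succ t ih =>
    intro J hJ
    rw [List.range'_succ]
    simp only [List.foldl_cons]
    rw [stepA_spec matrix n m I J hI (by omega)]
    exact ih (J + 1) (by omega)

theorem dpS_mend (matrix : List (List Int)) (n m I : Nat) :
    dpS matrix n m I m = dpS matrix n m (I + 1) 0 := by
  apply List.ext_getElem
  · simp [dpS]
  · intro r h1 h2
    rw [getElem_dpS, getElem_dpS]
    by_cases hr1 : r < I
    · rw [if_pos hr1, if_pos (by omega)]
    · by_cases hr2 : r = I
      · subst hr2
        rw [if_neg hr1, if_pos rfl, if_pos (by omega)]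
        exact List.map_congr_left (fun k hk => if_pos (List.mem_range.mp hk))
      · by_cases hr3 : r = I + 1
        · subst hr3
          rw [if_neg hr1, if_neg hr2, if_neg (by omega), if_pos rfl]
          rw [List.map_congr_left (fun (k : Nat) (_ : k ∈ List.range m) =>
                if_neg (by omega : ¬ k < 0))]
          simp [List.map_const']
        · rw [if_neg hr1, if_neg hr2, if_neg (by omega), if_neg (by omega)]

theorem innerFoldA0 (matrix : List (List Int)) (n m I : Nat) (hI : I < n) :
    (List.range m).foldl (fun dp (j : Nat) => pvStepA matrix dp (I : Int) (j : Int))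
      (dpS matrix n m I 0) = dpS matrix n m I m := by
  rw [List.range_eq_range']
  exact innerFoldA matrix n m I hI m 0 (by omega)

theorem outerFoldA (matrix : List (List Int)) (n m : Nat) :
    ∀ (t I : Nat), I + t = n →
      (List.range' I t).foldl
        (fun dp (i : Nat) => (List.range m).foldl
          (fun dp (j : Nat) => pvStepA matrix dp (i : Int) (j : Int)) dp)
        (dpS matrix n m I 0) = dpS matrix n m n 0 := by
  intro t
  induction t with
  | zero =>
    intro I hI
    have : I = n := by omega
    subst this; simp [List.range']
  | succ t ih =>
    intro I hI
    rw [List.range'_succ]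
    simp only [List.foldl_cons]
    rw [innerFoldA0 matrix n m I (by omega), dpS_mend matrix n m I]
    exact ih (I + 1) (by omega)

theorem dp0_eq (matrix : List (List Int)) (n m : Nat) :
    List.replicate n (List.replicate m (0 : Int)) = dpS matrix n m 0 0 := by
  apply List.ext_getElem
  · simp [dpS]
  · intro r h1 h2
    rw [getElem_dpS, List.getElem_replicate]
    by_cases hr : r = 0
    · subst hr
      rw [if_neg (by omega), if_pos rfl]
      rw [List.map_congr_left (fun (k : Nat) (_ : k ∈ List.range m) =>
            if_neg (by omega : ¬ k < 0))]
      simp [List.map_const']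
    · rw [if_neg (by omega), if_neg hr]

theorem dpS_last (matrix : List (List Int)) (n m : Nat) (hn : 0 < n) (hm : 0 < m) :
    PySem.List.pyGetD (PySem.List.pyGetD (dpS matrix n m n 0) (-1) []) (-1) 0
      = fF matrix (n - 1) (m - 1) := by
  have hlen : (dpS matrix n m n 0).length = n := by simp [dpS]
  have hne : dpS matrix n m n 0 ≠ [] := by
    intro h; rw [h] at hlen; simp at hlen; omega
  rw [PySem.List.pyGetD_neg_one _ _ hne, List.getLast_eq_getElem]
  have h2 : (dpS matrix n m n 0).length - 1 < (dpS matrix n m n 0).length := by omega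
  rw [getElem_dpS _ _ _ _ _ _ h2]
  rw [if_pos (by omega : (dpS matrix n m n 0).length - 1 < n)]
  rw [hlen]
  have hrne : rowF matrix m (n - 1) ≠ [] := by
    simp [rowF]; omega
  rw [PySem.List.pyGetD_neg_one _ _ hrne, List.getLast_eq_getElem]
  have hrl : (rowF matrix m (n - 1)).length = m := by simp [rowF]
  simp only [rowF, List.getElem_map, List.getElem_range]
  rw [List.length_map, List.length_range]

theorem outerFoldA0 (matrix : List (List Int)) (n m : Nat) :
    (List.range n).foldl
      (fun dp (i : Nat) => (List.range m).foldl
        (fun dp (j : Nat) => pvStepA matrix dp (i : Int) (j : Int)) dp)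
      (dpS matrix n m 0 0) = dpS matrix n m n 0 := by
  rw [show List.range n = List.range' 0 n from List.range_eq_range']
  exact outerFoldA matrix n m n 0 (by omega)

theorem portA_eq (matrix : List (List Int)) (h1 : matrix ≠ []) (h2 : matrix.headD [] ≠ []) :
    maxOfMinAltitudes2 matrix = fF matrix (matrix.length - 1) ((matrix.headD []).length - 1) := by
  have hg : ¬(matrix = [] ∨ matrix.headD [] = []) := not_or.mpr ⟨h1, h2⟩
  simp only [maxOfMinAltitudes2, hg, if_false]
  simp only [PySem.List.pyRange_zero_nat, List.foldl_map]
  rw [dp0_eq matrix matrix.length (matrix.headD []).length]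
  rw [outerFoldA0 matrix matrix.length (matrix.headD []).length]
  exact dpS_last matrix matrix.length (matrix.headD []).length
    (by cases matrix with
        | nil => exact absurd rfl h1
        | cons a l => simp)
    (by cases hm : matrix.headD [] with
        | nil => exact absurd hm h2
        | cons a l => simp)

-- B side: the memo invariant, and solveB computes fF while preserving it.
def InvM (matrix : List (List Int)) (memo : PySem.Dict (Nat × Nat) Int) : Prop :=
  ∀ i j v, memo.get? (i, j) = some v → v = fF matrix i j

theorem pvAccB_eq (matrix : List (List Int)) (i j : Nat) :
    pvAccB matrix i j = aF matrix i j := by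
  simp [pvAccB, aF, PySem.List.pyGetD_natCast]

theorem InvM_insert (matrix : List (List Int)) (memo : PySem.Dict (Nat × Nat) Int)
    (i j : Nat) (h : InvM matrix memo) :
    InvM matrix (memo.insert (i, j) (fF matrix i j)) := by
  intro i' j' v hv
  rw [PySem.Dict.get?_insert] at hv
  by_cases he : (i', j') = ((i, j) : Nat × Nat)
  · rw [if_pos he] at hv
    cases hv
    obtain ⟨h1, h2⟩ := Prod.mk.injEq .. ▸ he
    rw [h1, h2]
  · rw [if_neg he] at hv
    exact h i' j' v hv

theorem solveB_spec (matrix : List (List Int)) :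
    ∀ (i j : Nat) (memo : PySem.Dict (Nat × Nat) Int), InvM matrix memo →
      (solveB matrix i j memo).1 = fF matrix i j ∧ InvM matrix (solveB matrix i j memo).2 := by
  intro i j
  induction i, j using fF.induct with
  | case1 =>
    intro memo hm
    rw [solveB, fF]
    refine ⟨by rw [pvAccB_eq], ?_⟩
    have := InvM_insert matrix memo 0 0 hm
    rw [show fF matrix 0 0 = aF matrix 0 0 from by rw [fF]] at this
    simpa [pvAccB_eq] using this
  | case2 j =>
    intro memo hm
    rw [solveB]
    refine ⟨by rw [pvAccB_eq, pvAccB_eq, fF], ?_⟩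
    have := InvM_insert matrix memo 0 (j + 1) hm
    rw [show fF matrix 0 (j + 1) = min (aF matrix 0 (j + 1)) (aF matrix 0 j) from by rw [fF]]
      at this
    simpa [pvAccB_eq] using this
  | case3 i =>
    intro memo hm
    rw [solveB]
    refine ⟨by rw [pvAccB_eq, pvAccB_eq, fF], ?_⟩
    have := InvM_insert matrix memo (i + 1) 0 hm
    rw [show fF matrix (i + 1) 0 = min (aF matrix (i + 1) 0) (aF matrix i 0) from by rw [fF]]
      at this
    simpa [pvAccB_eq] using this
  | case4 i j ih1 ih2 =>
    intro memo hm
    rw [solveB]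
    have hr1 : (match memo.get? (i, j + 1) with
        | some v => (v, memo)
        | none => solveB matrix i (j + 1) memo).1 = fF matrix i (j + 1) ∧
        InvM matrix (match memo.get? (i, j + 1) with
        | some v => (v, memo)
        | none => solveB matrix i (j + 1) memo).2 := by
      cases hg : memo.get? (i, j + 1) with
      | some v => exact ⟨hm i (j + 1) v hg, hm⟩
      | none => exact ih1 memo hm
    set r1 := (match memo.get? (i, j + 1) with
        | some v => (v, memo)
        | none => solveB matrix i (j + 1) memo) with hr1def
    have hr2 : (match r1.2.get? (i + 1, j) with
        | some v => (v, r1.2)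
        | none => solveB matrix (i + 1) j r1.2).1 = fF matrix (i + 1) j ∧
        InvM matrix (match r1.2.get? (i + 1, j) with
        | some v => (v, r1.2)
        | none => solveB matrix (i + 1) j r1.2).2 := by
      cases hg : r1.2.get? (i + 1, j) with
      | some v => exact ⟨hr1.2 (i + 1) j v hg, hr1.2⟩
      | none => exact ih2 r1.2 hr1.2
    set r2 := (match r1.2.get? (i + 1, j) with
        | some v => (v, r1.2)
        | none => solveB matrix (i + 1) j r1.2) with hr2def
    constructor
    · rw [pvAccB_eq, hr1.1, hr2.1, fF]
    · have := InvM_insert matrix r2.2 (i + 1) (j + 1) hr2.2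
      rw [show fF matrix (i + 1) (j + 1)
            = min (aF matrix (i + 1) (j + 1)) (max (fF matrix i (j + 1)) (fF matrix (i + 1) j))
          from by rw [fF]] at this
      rw [pvAccB_eq, hr1.1, hr2.1]
      exact this

theorem portB_eq (matrix : List (List Int)) (h1 : matrix ≠ []) (h2 : matrix.headD [] ≠ []) :
    maxOfMinAltitudes2_alt matrix
      = fF matrix (matrix.length - 1) ((matrix.headD []).length - 1) := by
  have hg : ¬(matrix = [] ∨ matrix.headD [] = []) := not_or.mpr ⟨h1, h2⟩
  simp only [maxOfMinAltitudes2_alt, hg, if_false]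
  exact (solveB_spec matrix (matrix.length - 1) ((matrix.headD []).length - 1)
    PySem.Dict.empty (fun i j v hv => by simp [PySem.Dict.get?_empty] at hv)).1

-- ===== VERDICT (by name: the statement is the Claim_ definition above) =====
theorem maxOfMinAltitudes2_spec : Claim_equal_maxOfMinAltitudes2 := by
  intro matrix _ hpre
  unfold Spec_maxOfMinAltitudes2
  by_cases h1 : matrix = []
  · simp [maxOfMinAltitudes2, maxOfMinAltitudes2_alt, h1]
  · by_cases h2 : matrix.headD [] = []
    · rw [maxOfMinAltitudes2, maxOfMinAltitudes2_alt, if_pos (Or.inr h2), if_pos (Or.inr h2)]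
    · rw [portA_eq matrix h1 h2, portB_eq matrix h1 h2]
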